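-- pv_equiv track=rewrite | github.com/mooselab/SDLog | utils/specialTokenHandler.py | _get_pos_dict
-- ===== SOURCE A (Python) =====
-- from collections import OrderedDict
--
-- def _get_pos_dict(pos_l, pos_r):
--     two_sides = list(set(pos_l) & set(pos_r))
--     left_side = list(set(pos_l) - set(two_sides))
--     right_side = list(set(pos_r) - set(two_sides))
--
--     # consecutive two sides token
--     two_sides.sort()
--     for i in range(len(two_sides)-1):
--         if two_sides[i] == two_sides[i+1]-1:
--             # right_side.append(two_sides.pop(i+1))
--             right_side.append(two_sides[i+1])
--             i = i + 1
--
--     pos_dict = OrderedDict()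
--     pos_dict.update({key: 'both' for key in two_sides})
--     pos_dict.update({key: 'left' for key in left_side})
--     pos_dict.update({key: 'right' for key in right_side})
--     pos_dict = sorted(pos_dict.items())
--     pos_dict = OrderedDict(pos_dict)
--     return pos_dict
-- ===== SOURCE B (Python) =====
-- from collections import OrderedDict
--
-- def _get_pos_dict(pos_l, pos_r):
--     set_l, set_r = set(pos_l), set(pos_r)
--     both = set_l & set_r
--     pos_dict = OrderedDict()
--     for x in sorted(set_l | set_r):
--         if x in both and (x - 1) in both:
--             pos_dict[x] = 'right'
--         elif x in both:
--             pos_dict[x] = 'both'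
--         elif x in set_l:
--             pos_dict[x] = 'left'
--         else:
--             pos_dict[x] = 'right'
--     return pos_dict
-- ===== Notes on version B (the rewrite author's own statement) =====
-- stated objective: simpler
-- what changed: Replaces A's intersection/difference sets, separate consecutive-pair detection loop and three layered dict updates by one classifying pass over the sorted union of positions ('right' if x and x-1 are on both sides, else 'both'/'left'/'right' by membership), building the result dict already in sorted key order.
import Mathlib
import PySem

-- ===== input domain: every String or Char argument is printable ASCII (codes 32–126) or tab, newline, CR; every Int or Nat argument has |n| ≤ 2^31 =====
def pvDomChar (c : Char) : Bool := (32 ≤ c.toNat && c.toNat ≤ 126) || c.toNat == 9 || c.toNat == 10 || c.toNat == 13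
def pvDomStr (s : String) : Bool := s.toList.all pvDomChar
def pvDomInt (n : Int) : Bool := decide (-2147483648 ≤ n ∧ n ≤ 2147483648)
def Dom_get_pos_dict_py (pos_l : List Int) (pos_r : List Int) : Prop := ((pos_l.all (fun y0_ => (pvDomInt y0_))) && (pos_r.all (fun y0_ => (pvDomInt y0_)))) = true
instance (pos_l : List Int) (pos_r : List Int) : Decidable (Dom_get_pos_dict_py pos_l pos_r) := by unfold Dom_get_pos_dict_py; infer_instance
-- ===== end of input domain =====

-- B replaces A's consecutive-pair detection loop and three layered dict updates by one
-- classifying pass over the sorted union of positions (objective: simpler).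


-- ===== PORT A =====
def get_pos_dict_py (pos_l : List Int) (pos_r : List Int) : List (Int × String) :=
  -- two_sides = list(set(pos_l) & set(pos_r)); left_side/right_side = the set differences
  let two_sides0 : PySem.Set Int := PySem.Set.inter (PySem.Set.ofList pos_l) (PySem.Set.ofList pos_r)
  let left_side : PySem.Set Int := PySem.Set.diff (PySem.Set.ofList pos_l) (PySem.Set.ofList two_sides0)
  let right_side0 : PySem.Set Int := PySem.Set.diff (PySem.Set.ofList pos_r) (PySem.Set.ofList two_sides0)
  -- two_sides.sort()
  let two_sides := PySem.List.sorted two_sides0 (fun x => x) false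
  -- for i in range(len(two_sides)-1): if two_sides[i] == two_sides[i+1]-1: right_side.append(two_sides[i+1])
  let right_side := (PySem.List.pyRange 0 ((two_sides.length : Int) - 1) 1).foldl
      (fun rs i =>
        if PySem.List.pyGetD two_sides i 0 == PySem.List.pyGetD two_sides (i + 1) 0 - 1
        then rs ++ [PySem.List.pyGetD two_sides (i + 1) 0] else rs) right_side0
  -- pos_dict.update({key: 'both' …}); update({… 'left'}); update({… 'right'})
  let d0 := two_sides.foldl (fun d k => d.insert k "both") (PySem.Dict.empty : PySem.Dict Int String)
  let d1 := left_side.foldl (fun d k => d.insert k "left") d0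
  let d2 := right_side.foldl (fun d k => d.insert k "right") d1
  -- sorted(pos_dict.items()): dict keys are unique, so Python's tuple sort is exactly the sort by key
  PySem.List.sorted d2.items (fun p => p.1) false

-- ===== PORT B =====
def get_pos_dict_py_alt (pos_l : List Int) (pos_r : List Int) : List (Int × String) :=
  let set_l : PySem.Set Int := PySem.Set.ofList pos_l
  let set_r : PySem.Set Int := PySem.Set.ofList pos_r
  let both : PySem.Set Int := PySem.Set.inter set_l set_r
  ((PySem.List.sorted (PySem.Set.union set_l set_r) (fun x => x) false).foldl
    (fun d x =>
      if PySem.Set.contains both x && PySem.Set.contains both (x - 1) then d.insert x "right"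
      else if PySem.Set.contains both x then d.insert x "both"
      else if PySem.Set.contains set_l x then d.insert x "left"
      else d.insert x "right")
    (PySem.Dict.empty : PySem.Dict Int String)).items

-- ===== PRECONDITION & SPEC =====
def Spec_get_pos_dict_py (pos_l : List Int) (pos_r : List Int) (out : List (Int × String)) : Prop := out = get_pos_dict_py_alt pos_l pos_r
instance (pos_l : List Int) (pos_r : List Int) (out : List (Int × String)) : Decidable (Spec_get_pos_dict_py pos_l pos_r out) := by unfold Spec_get_pos_dict_py; infer_instance

-- ===== CLAIM (what is proved, stated in full; the proofs are below) =====
def Claim_equal_get_pos_dict_py : Prop := ∀ (pos_l : List Int) (pos_r : List Int), Dom_get_pos_dict_py pos_l pos_r → Spec_get_pos_dict_py pos_l pos_r (get_pos_dict_py pos_l pos_r)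

-- ===== LEMMAS AND PROOFS =====

-- B's per-key classification (the if-chain of the fold in get_pos_dict_py_alt, value only)
def gv (pos_l : List Int) (pos_r : List Int) (x : Int) : String :=
  let both := PySem.Set.inter (PySem.Set.ofList pos_l) (PySem.Set.ofList pos_r)
  if PySem.Set.contains both x && PySem.Set.contains both (x - 1) then "right"
  else if PySem.Set.contains both x then "both"
  else if PySem.Set.contains (PySem.Set.ofList pos_l) x then "left"
  else "right"

-- a loop inserting the SAME value for every key of l: lookup afterwards
theorem getD_foldl_insert_const {k n : Type} [BEq k] [LawfulBEq k] [DecidableEq k]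
    (l : List k) (v d0 : n) (d : PySem.Dict k n) (key : k) :
    (l.foldl (fun d x => d.insert x v) d).getD key d0
      = if key ∈ l then v else d.getD key d0 := by
  induction l generalizing d with
  | nil => simp
  | cons x l ih =>
    simp only [List.foldl_cons, ih, List.mem_cons]
    by_cases hx : key = x
    · subst hx
      by_cases hl : key ∈ l <;> simp [hl, PySem.Dict.getD_insert_self]
    · by_cases hl : key ∈ l <;>
        simp [hl, hx, PySem.Dict.getD_insert_of_ne _ v d0 hx]

-- A's consecutive-detection loop collects exactly the elements of the strictly
-- increasing list ts whose predecessor value is also in ts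
theorem mem_demoted (ts : List Int) (h : List.Pairwise (· < ·) ts) (key : Int) :
    key ∈ ((PySem.List.pyRange 0 ((ts.length : Int) - 1) 1).filter
        (fun i => PySem.List.pyGetD ts i 0 == PySem.List.pyGetD ts (i + 1) 0 - 1)).map
        (fun i => PySem.List.pyGetD ts (i + 1) 0) ↔ (key ∈ ts ∧ key - 1 ∈ ts) := by
  have hmono := List.pairwise_iff_getElem.mp h
  constructor
  · intro hk
    simp only [List.mem_map, List.mem_filter, PySem.List.mem_pyRange_one] at hk
    obtain ⟨i, ⟨⟨h0, h1⟩, hp⟩, hkey⟩ := hk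
    have hb1 : i + 1 < (ts.length : Int) := by omega
    have hb0 : (0:Int) ≤ i + 1 := by omega
    rw [PySem.List.pyGetD_eq_getElem ts 0 hb0 hb1] at hkey hp
    rw [PySem.List.pyGetD_eq_getElem ts 0 h0 (by omega)] at hp
    rw [beq_iff_eq] at hp
    subst hkey
    refine ⟨List.getElem_mem _, ?_⟩
    rw [← hp]
    exact List.getElem_mem _
  · rintro ⟨hk, hk1⟩
    obtain ⟨j, hj, hjk⟩ := List.mem_iff_getElem.mp hk
    obtain ⟨j', hj', hjk'⟩ := List.mem_iff_getElem.mp hk1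
    have hlt : j' < j := by
      rcases lt_trichotomy j' j with hc | hc | hc
      · exact hc
      · exfalso; subst hc; rw [hjk'] at hjk; omega
      · exfalso; have := hmono j j' hj hj' hc; omega
    have hj1 : j - 1 < ts.length := by omega
    have hts1 : ts[j - 1]'hj1 = key - 1 := by
      rcases Nat.lt_or_ge j' (j - 1) with hc | hc
      · have ha := hmono j' (j - 1) hj' hj1 hc
        have hb := hmono (j - 1) j hj1 hj (by omega)
        rw [hjk'] at ha; rw [hjk] at hb; omega
      · have hje : j' = j - 1 := by omega
        subst hje; exact hjk'
    simp only [List.mem_map, List.mem_filter, PySem.List.mem_pyRange_one]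
    refine ⟨((j - 1 : Nat) : Int), ⟨⟨by positivity, by omega⟩, ?_⟩, ?_⟩
    · have he : ((j - 1 : Nat) : Int) + 1 = ((j : Nat) : Int) := by
        have : 1 ≤ j := by omega
        push_cast [Nat.cast_sub this]; ring
      rw [he, PySem.List.pyGetD_natCast, PySem.List.pyGetD_natCast,
          List.getD_eq_getElem ts 0 hj1, List.getD_eq_getElem ts 0 hj,
          hjk, hts1]
      simp
    · have he : ((j - 1 : Nat) : Int) + 1 = ((j : Nat) : Int) := by
        have : 1 ≤ j := by omega
        push_cast [Nat.cast_sub this]; ring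
      rw [he, PySem.List.pyGetD_natCast, List.getD_eq_getElem ts 0 hj, hjk]

-- B's port is the sorted union of positions mapped through the classifier gv
theorem alt_eq (pos_l pos_r : List Int) :
    get_pos_dict_py_alt pos_l pos_r
      = (PySem.List.sorted
          (PySem.Set.union (PySem.Set.ofList pos_l) (PySem.Set.ofList pos_r))
          (fun x => x) false).map (fun x => (x, gv pos_l pos_r x)) := by
  simp only [get_pos_dict_py_alt]
  have h1 : ((PySem.List.sorted
        (PySem.Set.union (PySem.Set.ofList pos_l) (PySem.Set.ofList pos_r))
        (fun x => x) false).foldl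
      (fun (d : PySem.Dict Int String) x =>
        if PySem.Set.contains (PySem.Set.inter (PySem.Set.ofList pos_l) (PySem.Set.ofList pos_r)) x
            && PySem.Set.contains (PySem.Set.inter (PySem.Set.ofList pos_l) (PySem.Set.ofList pos_r)) (x - 1)
        then d.insert x "right"
        else if PySem.Set.contains (PySem.Set.inter (PySem.Set.ofList pos_l) (PySem.Set.ofList pos_r)) x
        then d.insert x "both"
        else if PySem.Set.contains (PySem.Set.ofList pos_l) x then d.insert x "left"
        else d.insert x "right") PySem.Dict.empty)
      = ((PySem.List.sorted
        (PySem.Set.union (PySem.Set.ofList pos_l) (PySem.Set.ofList pos_r))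
        (fun x => x) false).foldl
      (fun (d : PySem.Dict Int String) x => d.insert x (gv pos_l pos_r x)) PySem.Dict.empty) := by
    apply PySem.List.foldl_congr_mem
    intro acc x _
    simp only [gv]
    split_ifs <;> rfl
  rw [h1]
  have h2 := PySem.Dict.items_foldl_insert_fresh
      (PySem.List.sorted (PySem.Set.union (PySem.Set.ofList pos_l) (PySem.Set.ofList pos_r)) (fun x => x) false)
      (fun x => x) (gv pos_l pos_r) (PySem.Dict.empty : PySem.Dict Int String)
      (by intro a _; exact PySem.Dict.contains_empty a)
      (by
        simp only [List.map_id']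
        exact ((PySem.List.sorted_perm _ _ _).nodup_iff).mpr
          (PySem.Set.nodup_union _ _ (PySem.Set.nodup_ofList _)))
  simpa using h2

-- ===== VERDICT (by name: the statement is the Claim_ definition above) =====
theorem get_pos_dict_py_spec : Claim_equal_get_pos_dict_py := by
  intro pos_l pos_r _
  unfold Spec_get_pos_dict_py
  rw [alt_eq]
  simp only [get_pos_dict_py]
  rw [PySem.List.foldl_append_if]
  -- abbreviations
  set ts0 : PySem.Set Int :=
    PySem.Set.inter (PySem.Set.ofList pos_l) (PySem.Set.ofList pos_r) with hts0
  set ts := PySem.List.sorted ts0 (fun x => x) false with hts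
  set ls : PySem.Set Int :=
    PySem.Set.diff (PySem.Set.ofList pos_l) (PySem.Set.ofList ts0) with hls
  set rs0 : PySem.Set Int :=
    PySem.Set.diff (PySem.Set.ofList pos_r) (PySem.Set.ofList ts0) with hrs0
  set dem := ((PySem.List.pyRange 0 ((ts.length : Int) - 1) 1).filter
      (fun i => PySem.List.pyGetD ts i 0 == PySem.List.pyGetD ts (i + 1) 0 - 1)).map
      (fun i => PySem.List.pyGetD ts (i + 1) 0) with hdem
  set su := PySem.List.sorted
      (PySem.Set.union (PySem.Set.ofList pos_l) (PySem.Set.ofList pos_r))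
      (fun x => x) false with hsu
  -- nodup / sortedness facts
  have hts0nd : List.Nodup ts0 := PySem.Set.nodup_inter _ _ (PySem.Set.nodup_ofList _)
  have htsnd : ts.Nodup := ((PySem.List.sorted_perm _ _ _).nodup_iff).mpr hts0nd
  have htslt : List.Pairwise (· < ·) ts :=
    ((PySem.List.sorted_pairwise ts0 (fun x => x)).and htsnd).imp
      (fun hab => lt_of_le_of_ne hab.1 hab.2)
  have hsund : su.Nodup := ((PySem.List.sorted_perm _ _ _).nodup_iff).mpr
    (PySem.Set.nodup_union _ _ (PySem.Set.nodup_ofList _))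
  have hsult : List.Pairwise (· < ·) su :=
    ((PySem.List.sorted_pairwise _ (fun x => x)).and hsund).imp
      (fun hab => lt_of_le_of_ne hab.1 hab.2)
  -- membership characterisations
  have hmem_ts : ∀ x : Int, x ∈ ts ↔ (x ∈ pos_l ∧ x ∈ pos_r) := by
    intro x
    simp only [hts, PySem.List.mem_sorted, hts0, PySem.Set.mem_inter, PySem.Set.mem_ofList]
  have hmem_ls : ∀ x : Int, x ∈ ls ↔ (x ∈ pos_l ∧ ¬(x ∈ pos_l ∧ x ∈ pos_r)) := by
    intro x
    simp only [hls, PySem.Set.mem_diff, PySem.Set.mem_ofList, hts0, PySem.Set.mem_inter]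
  have hmem_rs0 : ∀ x : Int, x ∈ rs0 ↔ (x ∈ pos_r ∧ ¬(x ∈ pos_l ∧ x ∈ pos_r)) := by
    intro x
    simp only [hrs0, PySem.Set.mem_diff, PySem.Set.mem_ofList, hts0, PySem.Set.mem_inter]
  have hmem_dem : ∀ x : Int,
      x ∈ dem ↔ ((x ∈ pos_l ∧ x ∈ pos_r) ∧ (x - 1 ∈ pos_l ∧ x - 1 ∈ pos_r)) := by
    intro x
    rw [hdem, mem_demoted ts htslt]
    simp only [hmem_ts]
  have hmem_su : ∀ x : Int, x ∈ su ↔ (x ∈ pos_l ∨ x ∈ pos_r) := by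
    intro x
    simp only [hsu, PySem.List.mem_sorted, PySem.Set.mem_union, PySem.Set.mem_ofList]
  -- the dict built by A's three update loops
  set d2 := (rs0 ++ dem).foldl (fun (d : PySem.Dict Int String) k => d.insert k "right")
      (ls.foldl (fun (d : PySem.Dict Int String) k => d.insert k "left")
        (ts.foldl (fun (d : PySem.Dict Int String) k => d.insert k "both")
          (PySem.Dict.empty : PySem.Dict Int String))) with hd2
  have hkeysE : (PySem.Dict.empty : PySem.Dict Int String).keys = [] := rfl
  have hkeysnd : d2.keys.Nodup := by
    rw [hd2]
    exact PySem.Dict.nodup_keys_foldl_insert _ _ _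
      (PySem.Dict.nodup_keys_foldl_insert _ _ _
        (PySem.Dict.nodup_keys_foldl_insert _ _ _ (by simp [hkeysE])))
  have hkeys : d2.keys
      = PySem.Set.update (PySem.Set.update (PySem.Set.update
          (PySem.Dict.empty : PySem.Dict Int String).keys ts) ls) (rs0 ++ dem) := by
    rw [hd2, PySem.Dict.keys_foldl_insert, PySem.Dict.keys_foldl_insert,
        PySem.Dict.keys_foldl_insert]
  -- membership in d2.keys ↔ membership in either input list
  have hmemkeys : ∀ x : Int, x ∈ d2.keys ↔ (x ∈ pos_l ∨ x ∈ pos_r) := by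
    intro x
    rw [hkeys]
    simp only [PySem.Set.mem_update, hkeysE, List.mem_append, List.not_mem_nil,
      hmem_ts, hmem_ls, hmem_rs0, hmem_dem]
    tauto
  -- the value A's dict stores at each of its keys is gv
  have hval : ∀ x ∈ d2.keys, d2.getD x "" = gv pos_l pos_r x := by
    intro x hx
    have hxu := (hmemkeys x).mp hx
    rw [hd2, getD_foldl_insert_const, getD_foldl_insert_const, getD_foldl_insert_const]
    simp only [gv, Bool.and_eq_true, PySem.Set.contains_iff, PySem.Set.mem_inter,
      PySem.Set.mem_ofList, List.mem_append, hmem_dem, hmem_ts, hmem_ls, hmem_rs0,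
      PySem.Dict.getD_empty]
    by_cases hpl : x ∈ pos_l <;> by_cases hpr : x ∈ pos_r <;>
      by_cases hql : x - 1 ∈ pos_l <;> by_cases hqr : x - 1 ∈ pos_r <;>
      simp [hpl, hpr, hql, hqr] <;> tauto
  -- items of A's dict = its keys paired with gv
  have hitems : d2.items = d2.keys.map (fun x => (x, gv pos_l pos_r x)) := by
    rw [PySem.Dict.items_eq_map_keys d2 hkeysnd ""]
    exact List.map_congr_left (fun x hx => by rw [hval x hx])
  rw [hitems]
  -- the sorted-by-key items are exactly B's list
  apply PySem.List.sorted_eq_of_perm_of_pairwise_lt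
  · apply List.Perm.map
    refine (List.perm_ext_iff_of_nodup hsund hkeysnd).mpr ?_
    intro x
    rw [hmemkeys x, hmem_su x]
  · exact List.pairwise_map.mpr (hsult.imp (fun hab => hab))
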